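-- pv_equiv track=rewrite | github.com/Blackbox141/CaroCam | app_video.py | generate_placement_from_board
-- ===== SOURCE A (Python) =====
-- FEN_MAPPING = {
--     'Black Pawn': 'p',
--     'Black Bishop': 'b',
--     'Black King': 'k',
--     'Black Queen': 'q',
--     'Black Rook': 'r',
--     'Black Knight': 'n',
--     'White Pawn': 'P',
--     'White Bishop': 'B',
--     'White King': 'K',
--     'White Queen': 'Q',
--     'White Rook': 'R',
--     'White Knight': 'N'
-- }
--
-- def generate_placement_from_board(midpoints, labels, grid_size=8):
--     board = [['' for _ in range(grid_size)] for _ in range(grid_size)]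
--     step_size = 800 // grid_size
--     for (mx, my), lbl in zip(midpoints, labels):
--         c = int(my // step_size)
--         r = 7 - int(mx // step_size)
--         if 0 <= r < grid_size and 0 <= c < grid_size:
--             fen_char = FEN_MAPPING.get(lbl, '')
--             board[r][c] = fen_char
--
--     fen_rows = []
--     for row_data in board:
--         empty_count = 0
--         fen_row = ''
--         for sq in row_data:
--             if sq == '':
--                 empty_count += 1
--             else:
--                 if empty_count > 0:
--                     fen_row += str(empty_count)
--                     empty_count = 0
--                 fen_row += sq
--         if empty_count > 0:
--             fen_row += str(empty_count)
--         fen_rows.append(fen_row)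
--     return '/'.join(fen_rows)
-- ===== SOURCE B (Python) =====
-- FEN_MAPPING = {
--     'Black Pawn': 'p',
--     'Black Bishop': 'b',
--     'Black King': 'k',
--     'Black Queen': 'q',
--     'Black Rook': 'r',
--     'Black Knight': 'n',
--     'White Pawn': 'P',
--     'White Bishop': 'B',
--     'White King': 'K',
--     'White Queen': 'Q',
--     'White Rook': 'R',
--     'White Knight': 'N'
-- }
--
-- def generate_placement_from_board(midpoints, labels, grid_size=8):
--     step_size = 800 // grid_size
--     occ = {}
--     for (mx, my), lbl in zip(midpoints, labels):
--         c = int(my // step_size)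
--         r = 7 - int(mx // step_size)
--         if 0 <= r < grid_size and 0 <= c < grid_size:
--             occ[(r, c)] = FEN_MAPPING.get(lbl, '')
--     rows = []
--     for r in range(grid_size):
--         cols = sorted(c for (rr, c) in occ if rr == r and occ[(rr, c)])
--         parts = []
--         prev = 0
--         for c in cols:
--             if c > prev:
--                 parts.append(str(c - prev))
--             parts.append(occ[(r, c)])
--             prev = c + 1
--         if grid_size > prev:
--             parts.append(str(grid_size - prev))
--         rows.append(''.join(parts))
--     return '/'.join(rows)
-- ===== Notes on version B (the rewrite author's own statement) =====
-- stated objective: alternative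
-- what changed: B replaces A's dense grid_size x grid_size board plus per-square empty-run accumulator by a sparse dict keyed on (row, col) of occupied squares, serializing each rank by gap arithmetic over its sorted occupied columns.
import Mathlib
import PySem

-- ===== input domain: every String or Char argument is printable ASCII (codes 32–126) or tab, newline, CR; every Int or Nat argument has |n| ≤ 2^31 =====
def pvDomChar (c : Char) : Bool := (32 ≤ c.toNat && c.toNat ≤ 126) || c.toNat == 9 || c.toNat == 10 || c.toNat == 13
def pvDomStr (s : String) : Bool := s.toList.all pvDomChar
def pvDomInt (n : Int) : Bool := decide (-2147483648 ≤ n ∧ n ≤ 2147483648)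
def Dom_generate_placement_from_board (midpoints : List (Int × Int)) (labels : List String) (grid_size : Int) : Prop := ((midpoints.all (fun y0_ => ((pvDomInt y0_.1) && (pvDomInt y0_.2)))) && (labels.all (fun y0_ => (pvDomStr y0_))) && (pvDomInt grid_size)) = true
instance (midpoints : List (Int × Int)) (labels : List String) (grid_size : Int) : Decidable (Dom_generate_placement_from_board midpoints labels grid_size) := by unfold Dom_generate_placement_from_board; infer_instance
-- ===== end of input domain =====

-- B replaces A's dense grid_size×grid_size board and empty-run accumulator by a sparse dict of occupied
-- squares serialized with gap arithmetic over the sorted occupied columns of each row (objective: alternative).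

-- FEN_MAPPING, the module-level constant both implementations share
def pvFEN : PySem.Dict String String := PySem.Dict.ofList
  [("Black Pawn", "p"), ("Black Bishop", "b"), ("Black King", "k"), ("Black Queen", "q"),
   ("Black Rook", "r"), ("Black Knight", "n"), ("White Pawn", "P"), ("White Bishop", "B"),
   ("White King", "K"), ("White Queen", "Q"), ("White Rook", "R"), ("White Knight", "N")]

-- ===== PORT A =====
def generate_placement_from_board (midpoints : List (Int × Int)) (labels : List String) (grid_size : Int) : String :=
  let board0 : List (List String) :=
    (PySem.List.pyRange 0 grid_size 1).map (fun _ => (PySem.List.pyRange 0 grid_size 1).map (fun _ => ""))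
  let step_size := PySem.Int.floordiv 800 grid_size
  let board := (midpoints.zip labels).foldl (fun board p =>
    let c := PySem.Int.floordiv p.1.2 step_size
    let r := 7 - PySem.Int.floordiv p.1.1 step_size
    if 0 ≤ r ∧ r < grid_size ∧ 0 ≤ c ∧ c < grid_size then
      let fen_char := pvFEN.getD p.2 ""
      PySem.List.pySetD board r (PySem.List.pySetD (PySem.List.pyGetD board r []) c fen_char)
    else board) board0
  let fen_rows := board.foldl (fun acc row_data =>
    let st := row_data.foldl (fun (st : Int × String) sq =>
      if sq = "" then (st.1 + 1, st.2)
      else ((0 : Int), st.2 ++ (if st.1 > 0 then PySem.Int.toStr st.1 else "") ++ sq)) ((0 : Int), "")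
    acc ++ [if st.1 > 0 then st.2 ++ PySem.Int.toStr st.1 else st.2]) ([] : List String)
  PySem.Str.join "/" fen_rows

-- ===== PORT B =====
def generate_placement_from_board_alt (midpoints : List (Int × Int)) (labels : List String) (grid_size : Int) : String :=
  let step_size := PySem.Int.floordiv 800 grid_size
  let occ := (midpoints.zip labels).foldl (fun (occ : PySem.Dict (Int × Int) String) p =>
    let c := PySem.Int.floordiv p.1.2 step_size
    let r := 7 - PySem.Int.floordiv p.1.1 step_size
    if 0 ≤ r ∧ r < grid_size ∧ 0 ≤ c ∧ c < grid_size then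
      occ.insert (r, c) (pvFEN.getD p.2 "")
    else occ) PySem.Dict.empty
  let rows := (PySem.List.pyRange 0 grid_size 1).foldl (fun acc r =>
    let cols := PySem.List.sorted (occ.keys.filterMap (fun k =>
      if k.1 = r ∧ occ.getD k "" ≠ "" then some k.2 else none)) (fun x => x)
    let st := cols.foldl (fun (st : List String × Int) c =>
      (st.1 ++ (if c > st.2 then [PySem.Int.toStr (c - st.2)] else []) ++ [occ.getD (r, c) ""], c + 1))
      (([] : List String), (0 : Int))
    acc ++ [PySem.Str.join "" (if grid_size > st.2 then st.1 ++ [PySem.Int.toStr (grid_size - st.2)] else st.1)])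
    ([] : List String)
  PySem.Str.join "/" rows

-- ===== PRECONDITION & SPEC =====
-- Pre_ excludes exactly the inputs where the Python raises ZeroDivisionError (grid_size = 0, or
-- grid_size > 800 — so step_size = 0 — with a nonempty midpoints/labels zip); B's Python raises there too.
def Pre_generate_placement_from_board (midpoints : List (Int × Int)) (labels : List String) (grid_size : Int) : Prop :=
  grid_size ≠ 0 ∧ (grid_size ≤ 800 ∨ midpoints = [] ∨ labels = [])
instance (midpoints : List (Int × Int)) (labels : List String) (grid_size : Int) : Decidable (Pre_generate_placement_from_board midpoints labels grid_size) := by unfold Pre_generate_placement_from_board; infer_instance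
def pvWitness_generate_placement_from_board : (List (Int × Int)) × List String × Int :=
  ([(50, 450), (750, 50)], ["Black King", "White Rook"], 8)

def Spec_generate_placement_from_board (midpoints : List (Int × Int)) (labels : List String) (grid_size : Int) (out : String) : Prop := out = generate_placement_from_board_alt midpoints labels grid_size
instance (midpoints : List (Int × Int)) (labels : List String) (grid_size : Int) (out : String) : Decidable (Spec_generate_placement_from_board midpoints labels grid_size out) := by unfold Spec_generate_placement_from_board; infer_instance

-- ===== CLAIM (what is proved, stated in full; the proofs are below) =====
def Claim_equal_generate_placement_from_board : Prop := ∀ (midpoints : List (Int × Int)) (labels : List String) (grid_size : Int), Dom_generate_placement_from_board midpoints labels grid_size → Pre_generate_placement_from_board midpoints labels grid_size → Spec_generate_placement_from_board midpoints labels grid_size (generate_placement_from_board midpoints labels grid_size)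

-- ===== LEMMAS AND PROOFS =====

-- A's row serialization, as a recursion on the row (ec = pending run of empties)
def pvSerA : Int → List String → String
  | ec, [] => if ec > 0 then PySem.Int.toStr ec else ""
  | ec, sq :: t =>
    if sq = "" then pvSerA (ec + 1) t
    else (if ec > 0 then PySem.Int.toStr ec else "") ++ sq ++ pvSerA 0 t

-- B's row serialization, as a recursion on the (column, piece) list (prev = next unaccounted column)
def pvSerB (g : Int) : Int → List (Int × String) → String
  | prev, [] => if g > prev then PySem.Int.toStr (g - prev) else ""
  | prev, (c, s) :: t => (if c > prev then PySem.Int.toStr (c - prev) else "") ++ s ++ pvSerB g (c + 1) t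

-- the (column, piece) pairs of the nonempty squares of a row, columns starting at i
def pvCols : Int → List String → List (Int × String)
  | _, [] => []
  | i, sq :: t => if sq = "" then pvCols (i + 1) t else (i, sq) :: pvCols (i + 1) t

-- board cell accessor used by the invariant
def pvCell (board : List (List String)) (r c : Nat) : String := (board.getD r []).getD c ""

lemma pv_rowA (L : List String) : ∀ (ec : Int) (s : String),
    (let st := L.foldl (fun (st : Int × String) sq =>
      if sq = "" then (st.1 + 1, st.2)
      else ((0 : Int), st.2 ++ (if st.1 > 0 then PySem.Int.toStr st.1 else "") ++ sq)) (ec, s)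
     if st.1 > 0 then st.2 ++ PySem.Int.toStr st.1 else st.2) = s ++ pvSerA ec L := by
  induction L with
  | nil =>
    intro ec s
    simp only [List.foldl_nil, pvSerA]
    split <;> simp
  | cons sq t ih =>
    intro ec s
    simp only [List.foldl_cons, pvSerA]
    by_cases h : sq = "" <;> simp only [h, if_pos, if_false, reduceIte]
    · exact ih (ec + 1) s
    · rw [ih 0 _]
      simp [String.append_assoc]

lemma pv_cjoin (ls : List (List Char)) (l : List Char) :
    PySem.Chars.join [] (ls ++ [l]) = PySem.Chars.join [] ls ++ l := by
  induction ls with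
  | nil => simp [PySem.Chars.join_singleton, PySem.Chars.join_nil]
  | cons a t ih =>
    cases t with
    | nil => simp [PySem.Chars.join_singleton, PySem.Chars.join_cons_cons]
    | cons b t' =>
      simp only [List.cons_append, PySem.Chars.join_cons_cons] at *
      simp [ih]

lemma pv_join_empty_nil : PySem.Str.join "" [] = "" := by
  simp [PySem.Str.join, PySem.Chars.join_nil]

lemma pv_join_empty_append (xs : List String) (x : String) :
    PySem.Str.join "" (xs ++ [x]) = PySem.Str.join "" xs ++ x := by
  simp only [PySem.Str.join, List.map_append, List.map_cons, List.map_nil]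
  rw [show ("" : String).toList = [] from rfl, pv_cjoin, String.ofList_append, String.ofList_toList]

lemma pv_rowB (g : Int) (val : Int → String) (cols : List Int) : ∀ (prev : Int) (parts : List String),
    (let st := cols.foldl (fun (st : List String × Int) c =>
      (st.1 ++ (if c > st.2 then [PySem.Int.toStr (c - st.2)] else []) ++ [val c], c + 1)) (parts, prev)
     PySem.Str.join "" (if g > st.2 then st.1 ++ [PySem.Int.toStr (g - st.2)] else st.1))
    = PySem.Str.join "" parts ++ pvSerB g prev (cols.map (fun c => (c, val c))) := by
  induction cols with
  | nil =>
    intro prev parts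
    simp only [List.foldl_nil, List.map_nil, pvSerB]
    split
    · rw [pv_join_empty_append]
    · simp
  | cons c t ih =>
    intro prev parts
    simp only [List.foldl_cons, List.map_cons, pvSerB]
    rw [ih]
    by_cases h : c > prev <;> simp only [h, if_true, if_false, reduceIte]
    · rw [pv_join_empty_append, pv_join_empty_append]
      simp [String.append_assoc]
    · simp [pv_join_empty_append, String.append_assoc]

lemma pv_serB_serA (L : List String) : ∀ (prev ec : Int),
    pvSerB (prev + L.length) (prev - ec) (pvCols prev L) = pvSerA ec L := by
  induction L with
  | nil =>
    intro prev ec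
    simp only [List.length_nil, pvCols, pvSerB, pvSerA, Nat.cast_zero, add_zero]
    by_cases hec : ec > 0
    · rw [if_pos (by omega), if_pos hec, show prev - (prev - ec) = ec by ring]
    · rw [if_neg (by omega), if_neg hec]
  | cons sq t ih =>
    intro prev ec
    simp only [pvCols, pvSerA, List.length_cons]
    by_cases h : sq = "" <;> simp only [h, if_true, if_false, reduceIte]
    · push_cast
      have h2 := ih (prev + 1) (ec + 1)
      rw [show prev + 1 - (ec + 1) = prev - ec by ring] at h2
      rw [show prev + ((t.length : Int) + 1) = prev + 1 + t.length by ring]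
      exact h2
    · simp only [pvSerB]
      push_cast
      have h2 := ih (prev + 1) 0
      rw [sub_zero] at h2
      rw [show prev + ((t.length : Int) + 1) = prev + 1 + t.length by ring, h2]
      by_cases hec : ec > 0
      · rw [if_pos (by omega), if_pos hec, show prev - (prev - ec) = ec by ring]
      · rw [if_neg (by omega), if_neg hec]

lemma pv_mem_pvCols (L : List String) : ∀ (i : Int) (p : Int × String),
    p ∈ pvCols i L ↔ i ≤ p.1 ∧ p.1 < i + L.length ∧ L.getD (p.1 - i).toNat "" = p.2 ∧ p.2 ≠ "" := by
  induction L with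
  | nil => intro i p; simp [pvCols]
  | cons sq t ih =>
    intro i p
    by_cases h : sq = "" <;> simp only [pvCols, h, if_true, if_false, reduceIte]
    · rw [ih (i + 1) p]
      constructor
      · rintro ⟨h1, h2, h3, h4⟩
        refine ⟨by omega, by simp only [List.length_cons] at h2 ⊢; push_cast at h2 ⊢; omega, ?_, h4⟩
        rw [show (p.1 - i).toNat = (p.1 - (i + 1)).toNat + 1 by omega, List.getD_cons_succ]
        exact h3
      · rintro ⟨h1, h2, h3, h4⟩
        have hne : p.1 ≠ i := by
          intro he
          rw [he, show (i - i).toNat = 0 by omega, List.getD_cons_zero] at h3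
          exact h4 h3.symm
        refine ⟨by omega, by simp only [List.length_cons] at h2 ⊢; push_cast at h2 ⊢; omega, ?_, h4⟩
        rw [show (p.1 - i).toNat = (p.1 - (i + 1)).toNat + 1 by omega, List.getD_cons_succ] at h3
        exact h3
    · simp only [List.mem_cons, ih (i + 1) p]
      constructor
      · rintro (rfl | ⟨h1, h2, h3, h4⟩)
        · exact ⟨le_refl _, by simp only [List.length_cons]; push_cast; omega, by simp, h⟩
        · refine ⟨by omega, by simp only [List.length_cons] at h2 ⊢; push_cast at h2 ⊢; omega, ?_, h4⟩
          rw [show (p.1 - i).toNat = (p.1 - (i + 1)).toNat + 1 by omega, List.getD_cons_succ]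
          exact h3
      · rintro ⟨h1, h2, h3, h4⟩
        by_cases he : p.1 = i
        · left
          rw [he, show (i - i).toNat = 0 by omega, List.getD_cons_zero] at h3
          cases p; simp_all
        · right
          refine ⟨by omega, by simp only [List.length_cons] at h2 ⊢; push_cast at h2 ⊢; omega, ?_, h4⟩
          rw [show (p.1 - i).toNat = (p.1 - (i + 1)).toNat + 1 by omega, List.getD_cons_succ] at h3
          exact h3

lemma pv_pvCols_pairwise (L : List String) : ∀ (i : Int),
    (pvCols i L).Pairwise (fun a b => a.1 < b.1) := by
  induction L with
  | nil => intro i; simp [pvCols]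
  | cons sq t ih =>
    intro i
    by_cases h : sq = "" <;> simp only [pvCols, h, if_true, if_false, reduceIte]
    · exact ih (i + 1)
    · refine List.Pairwise.cons ?_ (ih (i + 1))
      intro q hq
      have := (pv_mem_pvCols t (i + 1) q).1 hq
      omega

lemma pv_getD_set {α : Type} (xs : List α) (m n : Nat) (v d : α) :
    (xs.set m v).getD n d = if m = n ∧ m < xs.length then v else xs.getD n d := by
  rw [List.getD_eq_getElem?_getD, List.getD_eq_getElem?_getD, List.getElem?_set]
  by_cases he : m = n
  · subst he
    by_cases hl : m < xs.length
    · simp [hl]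
    · simp [hl, List.getElem?_eq_none (show xs.length ≤ m by omega)]
  · simp [he]

lemma pv_pySetD_eq_set {α : Type} (xs : List α) (i : Int) (v : α) (h0 : 0 ≤ i) (h : i < xs.length) :
    PySem.List.pySetD xs i v = xs.set i.toNat v := by
  simp only [PySem.List.pySetD, PySem.List.pySet?, PySem.List.pyIdx?, if_pos h0, if_pos h]
  rfl

-- the placement invariant relating A's board to B's dict
def pvInv (g : Int) (board : List (List String)) (occ : PySem.Dict (Int × Int) String) : Prop :=
  board.length = g.toNat ∧ (∀ row ∈ board, row.length = g.toNat) ∧ occ.keys.Nodup ∧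
  (∀ k ∈ occ.keys, 0 ≤ k.1 ∧ k.1 < g ∧ 0 ≤ k.2 ∧ k.2 < g) ∧
  (∀ r c : Nat, r < g.toNat → c < g.toNat → pvCell board r c = occ.getD ((r : Int), (c : Int)) "")

lemma pv_place (g step : Int) (ps : List ((Int × Int) × String)) :
    ∀ (board : List (List String)) (occ : PySem.Dict (Int × Int) String), pvInv g board occ →
    pvInv g
      (ps.foldl (fun board p =>
        let c := PySem.Int.floordiv p.1.2 step
        let r := 7 - PySem.Int.floordiv p.1.1 step
        if 0 ≤ r ∧ r < g ∧ 0 ≤ c ∧ c < g then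
          let fen_char := pvFEN.getD p.2 ""
          PySem.List.pySetD board r (PySem.List.pySetD (PySem.List.pyGetD board r []) c fen_char)
        else board) board)
      (ps.foldl (fun occ p =>
        let c := PySem.Int.floordiv p.1.2 step
        let r := 7 - PySem.Int.floordiv p.1.1 step
        if 0 ≤ r ∧ r < g ∧ 0 ≤ c ∧ c < g then
          occ.insert (r, c) (pvFEN.getD p.2 "")
        else occ) occ) := by
  induction ps with
  | nil => intro board occ h; exact h
  | cons p ps ih =>
    intro board occ h
    simp only [List.foldl_cons]
    apply ih
    set c₀ := PySem.Int.floordiv p.1.2 step with hc₀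
    set r₀ := 7 - PySem.Int.floordiv p.1.1 step with hr₀
    by_cases hg : 0 ≤ r₀ ∧ r₀ < g ∧ 0 ≤ c₀ ∧ c₀ < g
    · simp only [hg, and_self, if_true]
      obtain ⟨hlen, hrows, hnd, hkr, hrel⟩ := h
      obtain ⟨hr0, hrg, hc0, hcg⟩ := hg
      set v := pvFEN.getD p.2 "" with hv
      have hrn : r₀.toNat < board.length := by omega
      have hrowlen : (board.getD r₀.toNat []).length = g.toNat := by
        apply hrows
        rw [List.getD_eq_getElem?_getD, List.getElem?_eq_getElem hrn]
        exact List.getElem_mem hrn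
      have hb1 : PySem.List.pyGetD board (r₀ : Int) [] = board.getD r₀.toNat [] := by
        rw [show (r₀ : Int) = ((r₀.toNat : Nat) : Int) by omega, PySem.List.pyGetD_natCast, Int.toNat_natCast]
      have hb2 : PySem.List.pySetD (board.getD r₀.toNat []) c₀ v
          = (board.getD r₀.toNat []).set c₀.toNat v := by
        apply pv_pySetD_eq_set _ _ _ hc0
        rw [hrowlen]; omega
      have hb3 : PySem.List.pySetD board r₀ ((board.getD r₀.toNat []).set c₀.toNat v)
          = board.set r₀.toNat ((board.getD r₀.toNat []).set c₀.toNat v) := by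
        apply pv_pySetD_eq_set _ _ _ hr0
        rw [hlen]; omega
      rw [hb1, hb2, hb3]
      refine ⟨by simp [hlen], ?_, PySem.Dict.nodup_keys_insert _ _ _ hnd, ?_, ?_⟩
      · intro row hrow
        rcases List.mem_or_eq_of_mem_set hrow with h' | h'
        · exact hrows row h'
        · rw [h', List.length_set]; exact hrowlen
      · intro k hk
        rcases (PySem.Dict.mem_keys_insert _ _ _ _).1 hk with rfl | h'
        · exact ⟨hr0, hrg, hc0, hcg⟩
        · exact hkr k h'
      · intro r c hr hc
        rw [PySem.Dict.getD_insert]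
        unfold pvCell
        rw [pv_getD_set]
        by_cases he : r = r₀.toNat
        · subst he
          rw [if_pos ⟨rfl, hrn⟩, pv_getD_set]
          by_cases hce : c = c₀.toNat
          · subst hce
            rw [if_pos ⟨rfl, by omega⟩, if_pos (by simp only [Prod.mk.injEq]; constructor <;> omega)]
          · rw [if_neg (by intro hh; exact hce hh.1.symm), if_neg (by intro hh; injection hh with h1 h2; omega)]
            exact hrel _ _ hr hc
        · rw [if_neg (by intro hh; exact he hh.1.symm), if_neg (by intro hh; injection hh with h1 h2; omega)]
          exact hrel _ _ hr hc
    · simp only [if_neg hg]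
      exact h

lemma pv_cols_sorted (g : Int) (board : List (List String)) (occ : PySem.Dict (Int × Int) String)
    (hinv : pvInv g board occ) (r : Int) (h0 : 0 ≤ r) (hr : r < g) :
    PySem.List.sorted (occ.keys.filterMap (fun k =>
      if k.1 = r ∧ occ.getD k "" ≠ "" then some k.2 else none)) (fun x => x)
    = (pvCols 0 (board.getD r.toNat [])).map Prod.fst := by
  obtain ⟨hlen, hrows, hnd, hkr, hrel⟩ := hinv
  have hrn : r.toNat < board.length := by omega
  have hrowlen : (board.getD r.toNat []).length = g.toNat := by
    apply hrows
    rw [List.getD_eq_getElem?_getD, List.getElem?_eq_getElem hrn]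
    exact List.getElem_mem hrn
  set row := board.getD r.toNat [] with hrowdef
  apply PySem.List.sorted_eq_of_perm_of_pairwise_lt
  · rw [List.perm_ext_iff_of_nodup]
    · intro c
      rw [List.mem_map, List.mem_filterMap]
      constructor
      · rintro ⟨p, hp, rfl⟩
        obtain ⟨h1, h2, h3, h4⟩ := (pv_mem_pvCols row 0 p).1 hp
        have hcg : p.1 < g := by omega
        have hval : occ.getD (r, p.1) "" = p.2 := by
          rw [show ((r : Int), p.1) = (((r.toNat : Nat) : Int), ((p.1.toNat : Nat) : Int)) by
                simp only [Prod.mk.injEq]; constructor <;> omega,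
              ← hrel r.toNat p.1.toNat (by omega) (by omega)]
          unfold pvCell
          rw [← hrowdef, show p.1.toNat = (p.1 - 0).toNat by omega]
          exact h3
        refine ⟨(r, p.1), ?_, ?_⟩
        · rw [← PySem.Dict.contains_iff_mem_keys]
          by_contra hnc
          simp only [Bool.not_eq_true] at hnc
          rw [PySem.Dict.getD_of_not_contains _ _ hnc] at hval
          exact h4 hval.symm
        · rw [if_pos ⟨rfl, by rw [hval]; exact h4⟩]
      · rintro ⟨k, hk, hfk⟩
        split at hfk
        · rename_i hcond
          obtain ⟨hk1, hk2⟩ := hcond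
          cases hfk
          obtain ⟨ha, hb, hc, hd⟩ := hkr k hk
          have hval : row.getD (k.2 - 0).toNat "" = occ.getD k "" := by
            rw [hrowdef]
            have := hrel r.toNat k.2.toNat (by omega) (by omega)
            unfold pvCell at this
            rw [show (k.2 - 0).toNat = k.2.toNat by omega, this,
                show (((r.toNat : Nat) : Int), ((k.2.toNat : Nat) : Int)) = (k.1, k.2) by
                  simp only [Prod.mk.injEq]; constructor <;> omega,
                show (k.1, k.2) = k from rfl]
          exact ⟨(k.2, occ.getD k ""), (pv_mem_pvCols row 0 _).2
            ⟨by omega, by omega, hval, hk2⟩, rfl⟩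
        · exact absurd hfk (by simp)
    · have hp : ((pvCols 0 row).map Prod.fst).Pairwise (· < ·) :=
        List.pairwise_map.mpr (pv_pvCols_pairwise row 0)
      exact hp.imp (fun h => ne_of_lt h)
    · apply List.Nodup.filterMap _ hnd
      intro a a' b hb hb'
      split at hb
      · rename_i hc1
        simp only [Option.mem_def, Option.some.injEq] at hb
        split at hb'
        · rename_i hc2
          simp only [Option.mem_def, Option.some.injEq] at hb'
          have h2 : a.2 = a'.2 := by rw [hb, hb']
          have h1 : a.1 = a'.1 := by rw [hc1.1, hc2.1]
          cases a; cases a'; simp_all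
        · simp at hb'
      · simp at hb
  · exact List.pairwise_map.mpr (pv_pvCols_pairwise row 0)

-- A's row body and B's row body as named functions (definitionally the port bodies)
def pvRowA (row_data : List String) : String :=
  let st := row_data.foldl (fun (st : Int × String) sq =>
    if sq = "" then (st.1 + 1, st.2)
    else ((0 : Int), st.2 ++ (if st.1 > 0 then PySem.Int.toStr st.1 else "") ++ sq)) ((0 : Int), "")
  if st.1 > 0 then st.2 ++ PySem.Int.toStr st.1 else st.2

def pvRowB (g : Int) (occ : PySem.Dict (Int × Int) String) (r : Int) : String :=
  let cols := PySem.List.sorted (occ.keys.filterMap (fun k =>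
    if k.1 = r ∧ occ.getD k "" ≠ "" then some k.2 else none)) (fun x => x)
  let st := cols.foldl (fun (st : List String × Int) c =>
    (st.1 ++ (if c > st.2 then [PySem.Int.toStr (c - st.2)] else []) ++ [occ.getD (r, c) ""], c + 1))
    (([] : List String), (0 : Int))
  PySem.Str.join "" (if g > st.2 then st.1 ++ [PySem.Int.toStr (g - st.2)] else st.1)

lemma pv_cols_vals (g : Int) (board : List (List String)) (occ : PySem.Dict (Int × Int) String)
    (hinv : pvInv g board occ) (r : Int) (h0 : 0 ≤ r) (hr : r < g) :
    ((pvCols 0 (board.getD r.toNat [])).map Prod.fst).map (fun c => (c, occ.getD (r, c) ""))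
    = pvCols 0 (board.getD r.toNat []) := by
  obtain ⟨hlen, hrows, hnd, hkr, hrel⟩ := hinv
  have hrn : r.toNat < board.length := by omega
  have hrowlen : (board.getD r.toNat []).length = g.toNat := by
    apply hrows
    rw [List.getD_eq_getElem?_getD, List.getElem?_eq_getElem hrn]
    exact List.getElem_mem hrn
  set row := board.getD r.toNat [] with hrowdef
  rw [List.map_map]
  have : ∀ p ∈ pvCols 0 row, ((fun c => (c, occ.getD (r, c) "")) ∘ Prod.fst) p = id p := by
    intro p hp
    obtain ⟨h1, h2, h3, h4⟩ := (pv_mem_pvCols row 0 p).1 hp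
    simp only [Function.comp_apply, id_eq]
    have hval : occ.getD (r, p.1) "" = p.2 := by
      rw [show ((r : Int), p.1) = (((r.toNat : Nat) : Int), ((p.1.toNat : Nat) : Int)) by
            simp only [Prod.mk.injEq]; constructor <;> omega,
          ← hrel r.toNat p.1.toNat (by omega) (by omega)]
      unfold pvCell
      rw [← hrowdef, show p.1.toNat = (p.1 - 0).toNat by omega]
      exact h3
    rw [hval]
  rw [List.map_congr_left this, List.map_id]

lemma pv_main (g : Int) (board : List (List String)) (occ : PySem.Dict (Int × Int) String)
    (hinv : pvInv g board occ) :
    PySem.Str.join "/" (board.foldl (fun acc row_data => acc ++ [pvRowA row_data]) [])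
    = PySem.Str.join "/" ((PySem.List.pyRange 0 g 1).foldl (fun acc r => acc ++ [pvRowB g occ r]) []) := by
  rw [PySem.List.foldl_append_singleton_eq_map, PySem.List.foldl_append_singleton_eq_map]
  simp only [List.nil_append]
  congr 1
  apply List.ext_getElem
  · simp only [List.length_map, PySem.List.length_pyRange_one, hinv.1]
    omega
  · intro i hi1 hi2
    simp only [List.getElem_map, PySem.List.getElem_pyRange_one, zero_add]
    have hib : i < board.length := by simpa using hi1
    have hlb := hinv.1
    have hig : i < g.toNat := by omega
    have hg0 : 0 < g := by omega
    have hrowget : board.getD ((i : Nat) : Int).toNat [] = board[i] := by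
      rw [Int.toNat_natCast, List.getD_eq_getElem?_getD, List.getElem?_eq_getElem hib]
      rfl
    have hrowlen : board[i].length = g.toNat := hinv.2.1 _ (List.getElem_mem hib)
    have hA : pvRowA board[i] = "" ++ pvSerA 0 board[i] := pv_rowA board[i] 0 ""
    have hcols := pv_cols_sorted g board occ hinv (i : Int) (by omega) (by omega)
    rw [hrowget] at hcols
    have hvals := pv_cols_vals g board occ hinv (i : Int) (by omega) (by omega)
    rw [hrowget] at hvals
    have hB : pvRowB g occ (i : Int)
        = PySem.Str.join "" []
          ++ pvSerB g 0 (((pvCols 0 board[i]).map Prod.fst).map (fun c => (c, occ.getD ((i : Int), c) ""))) := by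
      unfold pvRowB
      rw [hcols]
      exact pv_rowB g (fun c => occ.getD ((i : Int), c) "") ((pvCols 0 board[i]).map Prod.fst) 0 []
    rw [hA, String.empty_append, hB, hvals, pv_join_empty_nil, String.empty_append]
    have hser := pv_serB_serA board[i] 0 0
    rw [sub_zero, zero_add] at hser
    rw [show (g : Int) = (board[i].length : Int) by omega]
    exact hser.symm

theorem generate_placement_from_board_spec : Claim_equal_generate_placement_from_board := by
  intro midpoints labels grid_size hdom hpre
  unfold Spec_generate_placement_from_board
  unfold generate_placement_from_board generate_placement_from_board_alt
  refine pv_main grid_size _ _ (pv_place grid_size _ _ _ _ ?_)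
  refine ⟨?_, ?_, ?_, ?_, ?_⟩
  · simp [PySem.List.length_pyRange_one]
  · intro row hrow
    simp only [List.mem_map] at hrow
    obtain ⟨_, _, h⟩ := hrow
    rw [← h]
    simp [PySem.List.length_pyRange_one]
  · simp [PySem.Dict.keys_empty]
  · intro k hk
    simp [PySem.Dict.keys_empty] at hk
  · intro r c hr hc
    rw [PySem.Dict.getD_empty]
    unfold pvCell
    have hlt : r < ((PySem.List.pyRange 0 grid_size 1)).length := by
      rw [PySem.List.length_pyRange_one]; omega
    have h1 : (List.map (fun _ => List.map (fun _ => ("" : String)) (PySem.List.pyRange 0 grid_size 1))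
        (PySem.List.pyRange 0 grid_size 1)).getD r []
        = List.map (fun _ => ("" : String)) (PySem.List.pyRange 0 grid_size 1) := by
      rw [List.getD_eq_getElem?_getD, List.getElem?_map, List.getElem?_eq_getElem hlt]
      simp
    rw [h1]
    have hlt2 : c < ((PySem.List.pyRange 0 grid_size 1)).length := by
      rw [PySem.List.length_pyRange_one]; omega
    rw [List.getD_eq_getElem?_getD, List.getElem?_map, List.getElem?_eq_getElem hlt2]
    simp
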